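-- pv_equiv track=rewrite | github.com/alexandraback/datacollection | solutions_5670465267826688_0/Python/Eureka6174/a.py | gao
-- ===== SOURCE A (Python) =====
-- def mul(a, b):
-- 	c = 1
-- 	f = 1
-- 	if a[0] == '1':
-- 		c = b[0]
-- 	elif b[0] == '1':
-- 		c = a[0]
-- 	elif a[0] == b[0]:
-- 		c = '1'
-- 		f = -1
-- 	else:
-- 		s = 'ijkijk'
-- 		for i in range(3):
-- 			if a[0] == s[i] and b[0] == s[i+1]:
-- 				c = s[i+2]
-- 			if b[0] == s[i] and a[0] == s[i+1]:
-- 				c = s[i+2]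
-- 				f = -1
-- 	f *= a[1] * b[1]
-- 	return (c, f)
--
-- def gao(l):
-- 	first = {}
-- 	last = {}
-- 	t = ('1', 1)
-- 	for i in range(len(l)):
-- 		if t not in first:
-- 			first[t] = i
-- 		last[t] = i
-- 		t = mul(t, l[i])
-- 	if t != ('1', -1):
-- 		return 'NO'
-- 	if ('i', 1) in first and ('k', 1) in last and first[('i', 1)] < last[('k', 1)]:
-- 		return 'YES'
-- 	else:
-- 		return 'NO'
-- ===== SOURCE B (Python) =====
-- TAB = {('i', 'j'): ('k', 1), ('j', 'k'): ('i', 1), ('k', 'i'): ('j', 1),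
--        ('j', 'i'): ('k', -1), ('k', 'j'): ('i', -1), ('i', 'k'): ('j', -1)}
--
-- def qmul(a, b):
--     (x, s), (y, t) = a, b
--     sign = s * t
--     if x == '1':
--         return (y, sign)
--     if y == '1':
--         return (x, sign)
--     if x == y:
--         return ('1', -sign)
--     z, u = TAB.get((x, y), (1, 1))
--     return (z, u * sign)
--
-- def gao(l):
--     # one pass: a 3-stage automaton watches the running product instead of
--     # recording first/last indices of every state in dictionaries
--     t = ('1', 1)
--     stage = 0
--     for x in l:
--         if stage == 0:
--             if t == ('i', 1):
--                 stage = 1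
--         elif stage == 1:
--             if t == ('k', 1):
--                 stage = 2
--         t = qmul(t, x)
--     return 'YES' if t == ('1', -1) and stage == 2 else 'NO'
-- ===== Notes on version B (the rewrite author's own statement) =====
-- stated objective: simpler
-- what changed: A records first/last-occurrence dictionaries keyed by every running quaternion state and afterwards compares the first index of state ('i',1) with the last index of state ('k',1); B keeps no indices at all: a single pass threads a 3-stage automaton (seen an i-prefix, then seen a later k-prefix) alongside the running product, and the unit multiplication uses a precomputed product table instead of the 'ijkijk' cycle scan.
import Mathlib
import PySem

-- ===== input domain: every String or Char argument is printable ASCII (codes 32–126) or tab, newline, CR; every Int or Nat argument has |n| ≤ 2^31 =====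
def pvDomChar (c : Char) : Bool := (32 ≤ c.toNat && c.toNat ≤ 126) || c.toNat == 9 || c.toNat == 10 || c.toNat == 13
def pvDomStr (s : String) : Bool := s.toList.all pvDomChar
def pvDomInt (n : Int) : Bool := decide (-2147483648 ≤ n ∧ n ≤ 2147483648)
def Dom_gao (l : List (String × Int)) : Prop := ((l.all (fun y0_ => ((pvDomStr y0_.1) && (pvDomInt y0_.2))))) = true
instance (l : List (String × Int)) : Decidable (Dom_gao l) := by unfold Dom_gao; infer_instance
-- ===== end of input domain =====

-- B replaces A's first/last-occurrence dictionaries and index comparison by a single pass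
-- threading a 3-stage automaton alongside the running product; objective: simpler.
--
-- Python's running state t = (c, f) starts as ('1', 1); when no branch of mul fires, c becomes the
-- PYTHON INT 1 (not the string '1').  We model the first component as Option String: 'none' is that int 1.

-- ===== PORT A =====
-- mul(a, b): in gao, b is always an element of l (string-keyed pair); a is the running state.
def mulA (a : Option String × Int) (b : String × Int) : Option String × Int :=
  let s : List String := ["i", "j", "k", "i", "j", "k"]  -- s = 'ijkijk'; s[i] compares as a one-char string; all indices used are in range
  let cf : Option String × Int :=
    if a.1 = some "1" then (some b.1, 1)
    else if b.1 = "1" then (a.1, 1)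
    else if a.1 = some b.1 then (some "1", -1)
    else
      (List.range 3).foldl (fun cf i =>
        let cf1 := if a.1 = some (s.getD i "") ∧ b.1 = s.getD (i + 1) "" then (some (s.getD (i + 2) ""), cf.2) else cf
        if b.1 = s.getD i "" ∧ a.1 = some (s.getD (i + 1) "") then (some (s.getD (i + 2) ""), -1) else cf1)
        ((none : Option String), (1 : Int))
  (cf.1, cf.2 * (a.2 * b.2))

-- the 'for i in range(len(l))' loop, as structural recursion carrying the index i
def gaoLoop (first last : PySem.Dict (Option String × Int) Int)
    (t : Option String × Int) (i : Int) :
    List (String × Int) →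
      PySem.Dict (Option String × Int) Int × PySem.Dict (Option String × Int) Int × (Option String × Int)
  | [] => (first, last, t)
  | x :: xs =>
    let first' := if first.contains t then first else first.insert t i
    let last' := last.insert t i
    gaoLoop first' last' (mulA t x) (i + 1) xs

def gao (l : List (String × Int)) : String :=
  let r := gaoLoop PySem.Dict.empty PySem.Dict.empty (some "1", 1) 0 l
  if r.2.2 ≠ (some "1", -1) then "NO"
  else
    -- if ('i',1) in first and ('k',1) in last and first[('i',1)] < last[('k',1)]
    match r.1.get? (some "i", 1), r.2.1.get? (some "k", 1) with
    | some a, some b => if a < b then "YES" else "NO"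
    | _, _ => "NO"

-- ===== PORT B =====
def qmulTab : PySem.Dict (String × String) (Option String × Int) :=
  PySem.Dict.ofList
    [(("i", "j"), (some "k", 1)), (("j", "k"), (some "i", 1)), (("k", "i"), (some "j", 1)),
     (("j", "i"), (some "k", -1)), (("k", "j"), (some "i", -1)), (("i", "k"), (some "j", -1))]

def qmul (a : Option String × Int) (b : String × Int) : Option String × Int :=
  let sign := a.2 * b.2
  if a.1 = some "1" then (some b.1, sign)
  else if b.1 = "1" then (a.1, sign)
  else if a.1 = some b.1 then (some "1", -sign)
  else
    -- TAB.get((x, y), (1, 1)); a key whose first component is the int 1 is never in TAB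
    let zu := match a.1 with
      | some x => qmulTab.getD (x, b.1) (none, 1)
      | none => ((none : Option String), (1 : Int))
    (zu.1, zu.2 * sign)

def gao_alt (l : List (String × Int)) : String :=
  -- single pass: before each multiplication the automaton stage (a Python int 0/1/2) is advanced
  let r := l.foldl
    (fun (st : (Option String × Int) × Int) x =>
      let stage :=
        if st.2 = 0 then (if st.1 = ((some "i" : Option String), (1 : Int)) then (1 : Int) else 0)
        else if st.2 = 1 then (if st.1 = ((some "k" : Option String), (1 : Int)) then 2 else 1)
        else st.2
      (qmul st.1 x, stage))
    (((some "1" : Option String), (1 : Int)), (0 : Int))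
  if r.1 = (some "1", -1) ∧ r.2 = 2 then "YES" else "NO"

-- ===== PRECONDITION & SPEC =====
def Spec_gao (l : List (String × Int)) (out : String) : Prop := out = gao_alt l
instance (l : List (String × Int)) (out : String) : Decidable (Spec_gao l out) := by unfold Spec_gao; infer_instance

-- ===== CLAIM (what is proved, stated in full; the proofs are below) =====
def Claim_equal_gao : Prop := ∀ (l : List (String × Int)), Dom_gao l → Spec_gao l (gao l)

-- ===== LEMMAS AND PROOFS =====

-- the two multiplication helpers agree
set_option maxHeartbeats 1000000 in
theorem qmul_eq_mulA (a : Option String × Int) (b : String × Int) : qmul a b = mulA a b := by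
  obtain ⟨a1, a2⟩ := a
  obtain ⟨b1, b2⟩ := b
  have htab : qmulTab = PySem.Dict.mk
      [(("i", "j"), (some "k", 1)), (("j", "k"), (some "i", 1)), (("k", "i"), (some "j", 1)),
       (("j", "i"), (some "k", -1)), (("k", "j"), (some "i", -1)), (("i", "k"), (some "j", -1))] := by decide
  simp only [qmul, mulA, htab, PySem.Dict.getD_eq_get?_getD, PySem.Dict.get?_mk_cons,
    List.range_succ, List.range_zero, List.nil_append, List.foldl_append, List.foldl_cons,
    List.foldl_nil, List.getD_cons_zero, List.getD_cons_succ]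
  cases a1 with
  | none => norm_num; split_ifs <;> simp_all <;> ring
  | some x =>
    have hnil : (PySem.Dict.mk ([] : List ((String × String) × (Option String × Int)))).get? (x, b1) = none := rfl
    split_ifs <;> simp_all [beq_iff_eq, Prod.mk.injEq, hnil] <;> (try ring) <;>
      (try (split_ifs <;> simp_all))

-- proof-side characterisations of the two loops
def prefA (t : Option String × Int) : List (String × Int) → List (Option String × Int)
  | [] => []
  | x :: xs => t :: prefA (mulA t x) xs

def prodA (t : Option String × Int) : List (String × Int) → Option String × Int
  | [] => t
  | x :: xs => prodA (mulA t x) xs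

def fIdx (k : Option String × Int) : List (Option String × Int) → Option Int
  | [] => none
  | y :: ys => if y = k then some 0 else (fIdx k ys).map (· + 1)

def lIdx (k : Option String × Int) : List (Option String × Int) → Option Int
  | [] => none
  | y :: ys =>
    match lIdx k ys with
    | some j => some (j + 1)
    | none => if y = k then some 0 else none

-- B's stage automaton over a list of (prefix) states
def stageF (s : Int) : List (Option String × Int) → Int
  | [] => s
  | y :: ys =>
    stageF (if s = 0 then (if y = ((some "i" : Option String), (1 : Int)) then 1 else 0)
            else if s = 1 then (if y = ((some "k" : Option String), (1 : Int)) then 2 else 1)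
            else s) ys

theorem gaoLoop_spec (xs : List (String × Int)) :
    ∀ (first last : PySem.Dict (Option String × Int) Int) (t : Option String × Int) (i : Int),
      (gaoLoop first last t i xs).2.2 = prodA t xs ∧
      (∀ k, (gaoLoop first last t i xs).1.get? k
          = ((first.get? k).or ((fIdx k (prefA t xs)).map (i + ·)))) ∧
      (∀ k, (gaoLoop first last t i xs).2.1.get? k
          = (match lIdx k (prefA t xs) with
             | some j => some (i + j)
             | none => last.get? k)) := by
  induction xs with
  | nil => intro first last t i; simp [gaoLoop, prodA, prefA, fIdx, lIdx]
  | cons x xs ih =>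
    intro first last t i
    obtain ⟨ih1, ih2, ih3⟩ := ih (if first.contains t then first else first.insert t i)
      (last.insert t i) (mulA t x) (i + 1)
    refine ⟨by simpa [gaoLoop, prodA] using ih1, ?_, ?_⟩
    · intro k
      rw [show (gaoLoop first last t i (x :: xs)).1
            = (gaoLoop (if first.contains t then first else first.insert t i)
                (last.insert t i) (mulA t x) (i + 1) xs).1 from rfl, ih2 k]
      by_cases hk : k = t
      · subst hk
        by_cases hc : first.contains k
        · have : (first.get? k).isSome := by rw [← PySem.Dict.contains_eq_isSome_get?, hc]
          obtain ⟨v, hv⟩ := Option.isSome_iff_exists.mp this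
          simp [hc, hv, prefA, fIdx]
        · have hnone : first.get? k = none := by
            rcases h : first.get? k with _ | v
            · rfl
            · rw [PySem.Dict.contains_eq_isSome_get?, h] at hc; simp at hc
          simp [hc, hnone, prefA, fIdx, PySem.Dict.get?_insert]
      · have hk' : ¬ (t = k) := fun h => hk h.symm
        have hfst : (if first.contains t then first else first.insert t i).get? k
            = first.get? k := by
          split_ifs with hc
          · rfl
          · rw [PySem.Dict.get?_insert]; simp [hk]
        rw [hfst]
        simp only [prefA, fIdx, if_neg hk']
        cases h : fIdx k (prefA (mulA t x) xs) <;> cases hf : first.get? k <;>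
          simp [h, hf, Option.or] <;> try omega
    · intro k
      rw [show (gaoLoop first last t i (x :: xs)).2.1
            = (gaoLoop (if first.contains t then first else first.insert t i)
                (last.insert t i) (mulA t x) (i + 1) xs).2.1 from rfl, ih3 k]
      by_cases hk : k = t
      · subst hk
        simp only [prefA, lIdx]
        cases h : lIdx k (prefA (mulA k x) xs) <;>
          simp [h, PySem.Dict.get?_insert] <;> try omega
      · have hk' : ¬ (t = k) := fun h => hk h.symm
        have hins : (last.insert t i).get? k = last.get? k := by
          rw [PySem.Dict.get?_insert]; simp [hk]
        simp only [prefA, lIdx]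
        cases h : lIdx k (prefA (mulA t x) xs) <;>
          simp [h, hins, hk'] <;> try omega

-- B's fold computes the final product together with the stage of the prefix-state sequence
theorem foldB_spec (xs : List (String × Int)) :
    ∀ (t : Option String × Int) (s : Int),
      xs.foldl
        (fun (st : (Option String × Int) × Int) x =>
          let stage :=
            if st.2 = 0 then (if st.1 = ((some "i" : Option String), (1 : Int)) then (1 : Int) else 0)
            else if st.2 = 1 then (if st.1 = ((some "k" : Option String), (1 : Int)) then 2 else 1)
            else st.2
          (qmul st.1 x, stage)) (t, s)
      = (prodA t xs, stageF s (prefA t xs)) := by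
  induction xs with
  | nil => intro t s; simp [prodA, prefA, stageF]
  | cons x xs ih =>
    intro t s
    rw [List.foldl_cons, qmul_eq_mulA]
    simpa [prodA, prefA, stageF] using ih (mulA t x) _

-- basic facts about fIdx / lIdx / stageF
theorem fIdx_nonneg (k : Option String × Int) (ys : List (Option String × Int)) :
    ∀ a, fIdx k ys = some a → 0 ≤ a := by
  induction ys with
  | nil => intro a h; simp [fIdx] at h
  | cons y ys ih =>
    intro a h
    by_cases hy : y = k
    · simp [fIdx, hy] at h; omega
    · simp only [fIdx, if_neg hy] at h
      cases hf : fIdx k ys with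
      | none => rw [hf] at h; simp at h
      | some a' => rw [hf] at h; simp at h; have := ih a' hf; omega

theorem lIdx_isSome_iff (k : Option String × Int) (ys : List (Option String × Int)) :
    (lIdx k ys).isSome ↔ k ∈ ys := by
  induction ys with
  | nil => simp [lIdx]
  | cons y ys ih =>
    simp only [lIdx, List.mem_cons]
    cases h : lIdx k ys with
    | some j =>
      have hm : k ∈ ys := ih.mp (by simp [h])
      simp [hm]
    | none =>
      have hnm : ¬ k ∈ ys := fun m => by
        have := ih.mpr m; rw [h] at this; simp at this
      by_cases hy : y = k
      · simp [hy]
      · have hky : ¬ k = y := fun h' => hy h'.symm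
        simp [hy, hky, hnm]

theorem lIdx_nonneg (k : Option String × Int) (ys : List (Option String × Int)) :
    ∀ b, lIdx k ys = some b → 0 ≤ b := by
  induction ys with
  | nil => intro b h; simp [lIdx] at h
  | cons y ys ih =>
    intro b h
    simp only [lIdx] at h
    cases hf : lIdx k ys with
    | some j => rw [hf] at h; simp at h; have := ih j hf; omega
    | none =>
      rw [hf] at h
      by_cases hy : y = k <;> simp [hy] at h; omega

theorem stageF_two (ys : List (Option String × Int)) : stageF 2 ys = 2 := by
  induction ys with
  | nil => rfl
  | cons y ys ih => simpa [stageF] using ih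

theorem stageF_one (ys : List (Option String × Int)) :
    stageF 1 ys = 2 ↔ ((some "k" : Option String), (1 : Int)) ∈ ys := by
  induction ys with
  | nil => simp [stageF]
  | cons y ys ih =>
    by_cases hy : y = ((some "k" : Option String), (1 : Int))
    · simp [stageF, hy, stageF_two]
    · have hstep : stageF 1 (y :: ys) = stageF 1 ys := by simp [stageF, hy]
      rw [hstep, ih, List.mem_cons]
      exact ⟨Or.inr, fun h => h.elim (fun h' => absurd h'.symm hy) id⟩

-- the heart of the equivalence: "first i-state index < last k-state index" ⟺ the automaton finishes in stage 2
theorem stageF_zero_iff (ys : List (Option String × Int)) :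
    stageF 0 ys = 2 ↔
      (∃ a b : Int, fIdx ((some "i" : Option String), (1 : Int)) ys = some a ∧
        lIdx ((some "k" : Option String), (1 : Int)) ys = some b ∧ a < b) := by
  induction ys with
  | nil => simp [stageF, fIdx, lIdx]
  | cons y ys ih =>
    by_cases hy : y = ((some "i" : Option String), (1 : Int))
    · have hyk : ¬ y = ((some "k" : Option String), (1 : Int)) := by subst hy; decide
      have hstep : stageF 0 (y :: ys) = stageF 1 ys := by simp [stageF, hy]
      rw [hstep, stageF_one]
      constructor
      · intro hm
        obtain ⟨b, hb⟩ := Option.isSome_iff_exists.mp ((lIdx_isSome_iff _ ys).mpr hm)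
        refine ⟨0, b + 1, by simp [fIdx, hy], by simp [lIdx, hb], ?_⟩
        have := lIdx_nonneg _ ys b hb; omega
      · rintro ⟨a, b, ha, hb, hab⟩
        simp only [lIdx] at hb
        cases hf : lIdx ((some "k" : Option String), (1 : Int)) ys with
        | some j => exact (lIdx_isSome_iff _ ys).mp (by simp [hf])
        | none => rw [hf] at hb; simp [hyk] at hb
    · have hstep : stageF 0 (y :: ys) = stageF 0 ys := by simp [stageF, hy]
      rw [hstep, ih]
      constructor
      · rintro ⟨a, b, ha, hb, hab⟩
        refine ⟨a + 1, b + 1, ?_, ?_, by omega⟩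
        · simp [fIdx, hy, ha]
        · simp [lIdx, hb]
      · rintro ⟨a, b, ha, hb, hab⟩
        simp only [fIdx, if_neg hy] at ha
        cases hf : fIdx ((some "i" : Option String), (1 : Int)) ys with
        | none => rw [hf] at ha; simp at ha
        | some a' =>
          rw [hf] at ha; simp at ha
          simp only [lIdx] at hb
          cases hl : lIdx ((some "k" : Option String), (1 : Int)) ys with
          | some j =>
            rw [hl] at hb
            have hb' : b = j + 1 := by simpa using hb.symm
            refine ⟨a', j, rfl, rfl, ?_⟩
            omega
          | none =>
            rw [hl] at hb
            by_cases hyk : y = ((some "k" : Option String), (1 : Int))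
            · rw [if_pos hyk] at hb
              have := fIdx_nonneg _ ys a' hf
              simp at hb; omega
            · simp [hyk] at hb

-- ===== VERDICT (by name: the statement is the Claim_ definition above) =====
theorem gao_spec : Claim_equal_gao := by
  intro l _
  show gao l = gao_alt l
  obtain ⟨h1, h2, h3⟩ := gaoLoop_spec l PySem.Dict.empty PySem.Dict.empty (some "1", 1) 0
  rw [gao, gao_alt, foldB_spec, h1, h2 (some "i", 1), h3 (some "k", 1)]
  simp only [PySem.Dict.get?_empty, Option.none_or]
  by_cases hprod : prodA (some "1", 1) l = (some "1", -1)
  · simp only [hprod, ne_eq, not_true_eq_false, if_false]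
    by_cases hst : stageF 0 (prefA (some "1", 1) l) = 2
    · obtain ⟨a, b, ha, hb, hab⟩ := (stageF_zero_iff _).mp hst
      simp [ha, hb, hab, hst]
    · have hne : ¬ (∃ a b : Int, fIdx ((some "i" : Option String), (1 : Int)) (prefA (some "1", 1) l) = some a ∧
          lIdx ((some "k" : Option String), (1 : Int)) (prefA (some "1", 1) l) = some b ∧ a < b) :=
        fun h => hst ((stageF_zero_iff _).mpr h)
      rw [if_neg (by simp [hst])]
      cases hf : fIdx ((some "i" : Option String), (1 : Int)) (prefA (some "1", 1) l) with
      | none => simp [hf]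
      | some a =>
        cases hl : lIdx ((some "k" : Option String), (1 : Int)) (prefA (some "1", 1) l) with
        | none => simp [hf, hl]
        | some b =>
          have : ¬ a < b := fun hab => hne ⟨a, b, hf, hl, hab⟩
          simp [hf, hl]
          omega
  · simp [hprod]
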